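-- pv_equiv track=rewrite | github.com/CarlosArH/Python | Fud_programación/ejercicio9_C4.py | vocales_palabra
-- ===== SOURCE A (Python) =====
-- def vocales_palabra(palabra):
--     vocales = ["a", "e", "i", "o", "u"]
--     vocales_in = []
--     caracter = 0
--     todas_vocales = True
--     n_vocales = 0
--     for caracter in range(len(palabra)):
--         x = palabra[caracter]
--         if x in vocales:
--             if x in vocales_in:
--                 n_vocales += 0
--             else:
--                 n_vocales += 1
--                 vocales_in.append(x)
--     if n_vocales < 5:
--         todas_vocales = False
--     else:
--         todas_vocales = True
--     return todas_vocales
-- ===== SOURCE B (Python) =====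
-- def vocales_palabra(palabra):
--     return set("aeiou").issubset(set(palabra))
-- ===== Notes on version B (the rewrite author's own statement) =====
-- stated objective: idiomatic
-- what changed: Replaces the index loop with its membership list and distinct-vowel counter by a single vowel-set subset test over the word's character set.
import Mathlib
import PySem

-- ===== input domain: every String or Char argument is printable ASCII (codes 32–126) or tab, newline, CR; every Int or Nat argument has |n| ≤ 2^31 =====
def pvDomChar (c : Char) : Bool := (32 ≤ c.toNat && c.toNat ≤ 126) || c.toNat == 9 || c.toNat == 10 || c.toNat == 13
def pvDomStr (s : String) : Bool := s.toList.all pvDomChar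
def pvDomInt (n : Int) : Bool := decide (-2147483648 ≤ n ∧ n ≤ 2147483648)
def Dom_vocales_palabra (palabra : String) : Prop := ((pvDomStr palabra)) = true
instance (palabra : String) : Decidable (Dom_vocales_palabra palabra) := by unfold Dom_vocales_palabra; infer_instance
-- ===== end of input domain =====

-- B replaces A's index loop, membership list and distinct-vowel counter by one set-subset test (idiomatic; same cost).

-- ===== PORT A =====
def pvVowels : List Char := ['a', 'e', 'i', 'o', 'u']

-- the for-loop over range(len(palabra)); state: (vocales_in, n_vocales)
def pvLoopA : List Char → List Char → Int → List Char × Int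
  | [], vin, n => (vin, n)
  | x :: rest, vin, n =>
    if x ∈ pvVowels then
      if x ∈ vin then pvLoopA rest vin (n + 0)
      else pvLoopA rest (vin ++ [x]) (n + 1)
    else pvLoopA rest vin n

def vocales_palabra (palabra : String) : Bool :=
  let r := pvLoopA palabra.toList [] 0
  if r.2 < 5 then false else true

-- ===== PORT B =====
def vocales_palabra_alt (palabra : String) : Bool :=
  PySem.Set.issubset (PySem.Set.ofList ['a', 'e', 'i', 'o', 'u']) (PySem.Set.ofList palabra.toList)

-- ===== PRECONDITION & SPEC =====
def Spec_vocales_palabra (palabra : String) (out : Bool) : Prop := out = vocales_palabra_alt palabra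
instance (palabra : String) (out : Bool) : Decidable (Spec_vocales_palabra palabra out) := by unfold Spec_vocales_palabra; infer_instance

-- ===== CLAIM (what is proved, stated in full; the proofs are below) =====
def Claim_equal_vocales_palabra : Prop := ∀ (palabra : String), Dom_vocales_palabra palabra → Spec_vocales_palabra palabra (vocales_palabra palabra)

-- ===== LEMMAS AND PROOFS =====

-- loop invariant: the counter equals the length of vocales_in, which is a nodup
-- sublist of the vowels containing exactly the vowels seen so far
theorem pvLoopA_char (l : List Char) : ∀ (vin : List Char) (n : Int),
    n = vin.length → vin.Nodup → vin ⊆ pvVowels →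
    (pvLoopA l vin n).2 = ((pvLoopA l vin n).1.length : Int) ∧
    (pvLoopA l vin n).1.Nodup ∧ (pvLoopA l vin n).1 ⊆ pvVowels ∧
    (∀ v, v ∈ (pvLoopA l vin n).1 ↔ v ∈ vin ∨ (v ∈ pvVowels ∧ v ∈ l)) := by
  induction l with
  | nil =>
    intro vin n hn hd hs
    refine ⟨by simpa [pvLoopA] using hn, by simpa [pvLoopA] using hd,
      by simpa [pvLoopA] using hs, ?_⟩
    intro v; simp [pvLoopA]
  | cons x rest ih =>
    intro vin n hn hd hs
    by_cases hv : x ∈ pvVowels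
    · by_cases hin : x ∈ vin
      · have h := ih vin (n + 0) (by simpa using hn) hd hs
        refine ⟨?_, ?_, ?_, ?_⟩
        · simpa [pvLoopA, hv, hin] using h.1
        · simpa [pvLoopA, hv, hin] using h.2.1
        · simpa [pvLoopA, hv, hin] using h.2.2.1
        · intro v
          have := h.2.2.2 v
          simp only [pvLoopA, if_pos hv, if_pos hin] at *
          rw [this]
          constructor
          · rintro (h1 | ⟨h2, h3⟩)
            · exact Or.inl h1
            · exact Or.inr ⟨h2, List.mem_cons_of_mem _ h3⟩
          · rintro (h1 | ⟨h2, h3⟩)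
            · exact Or.inl h1
            · rcases List.mem_cons.mp h3 with rfl | h3
              · exact Or.inl hin
              · exact Or.inr ⟨h2, h3⟩
      · have hd' : (vin ++ [x]).Nodup := by
          simp [List.nodup_append, hd]
          exact fun a ha h => hin (h ▸ ha)
        have hs' : (vin ++ [x]) ⊆ pvVowels := by
          intro y hy
          rcases List.mem_append.mp hy with hy | hy
          · exact hs hy
          · have : y = x := List.mem_singleton.mp hy
            exact this ▸ hv
        have h := ih (vin ++ [x]) (n + 1) (by simp [hn]) hd' hs'
        refine ⟨?_, ?_, ?_, ?_⟩
        · simpa [pvLoopA, hv, hin] using h.1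
        · simpa [pvLoopA, hv, hin] using h.2.1
        · simpa [pvLoopA, hv, hin] using h.2.2.1
        · intro v
          have := h.2.2.2 v
          simp only [pvLoopA, if_pos hv, if_neg hin] at *
          rw [this]
          simp only [List.mem_append, List.mem_cons, List.not_mem_nil, or_false]
          constructor
          · rintro ((h1 | rfl) | ⟨h2, h3⟩)
            · exact Or.inl h1
            · exact Or.inr ⟨hv, Or.inl rfl⟩
            · exact Or.inr ⟨h2, Or.inr h3⟩
          · rintro (h1 | ⟨h2, rfl | h3⟩)
            · exact Or.inl (Or.inl h1)
            · exact Or.inl (Or.inr rfl)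
            · exact Or.inr ⟨h2, h3⟩
    · have h := ih vin n hn hd hs
      refine ⟨?_, ?_, ?_, ?_⟩
      · simpa [pvLoopA, hv] using h.1
      · simpa [pvLoopA, hv] using h.2.1
      · simpa [pvLoopA, hv] using h.2.2.1
      · intro v
        have := h.2.2.2 v
        simp only [pvLoopA, if_neg hv] at *
        rw [this]
        constructor
        · rintro (h1 | ⟨h2, h3⟩)
          · exact Or.inl h1
          · exact Or.inr ⟨h2, List.mem_cons_of_mem _ h3⟩
        · rintro (h1 | ⟨h2, h3⟩)
          · exact Or.inl h1
          · rcases List.mem_cons.mp h3 with rfl | h3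
            · exact absurd h2 hv
            · exact Or.inr ⟨h2, h3⟩

-- ===== VERDICT (by name: the statement is the Claim_ definition above) =====
theorem vocales_palabra_spec : Claim_equal_vocales_palabra := by
  intro palabra _
  unfold Spec_vocales_palabra vocales_palabra vocales_palabra_alt
  obtain ⟨hlen, hd, hs, hmem⟩ := pvLoopA_char palabra.toList [] 0 (by simp) (by simp) (by simp)
  simp only [List.not_mem_nil, false_or] at hmem
  have hall : (5 ≤ (pvLoopA palabra.toList [] 0).1.length) ↔
      (∀ v ∈ pvVowels, v ∈ palabra.toList) := by
    constructor
    · intro h5 v hv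
      have hsp : List.Subperm (pvLoopA palabra.toList [] 0).1 pvVowels := hd.subperm hs
      have hperm : List.Perm (pvLoopA palabra.toList [] 0).1 pvVowels :=
        hsp.perm_of_length_le (by simpa [pvVowels] using h5)
      exact ((hmem v).mp (hperm.mem_iff.mpr hv)).2
    · intro hv
      have hsub : pvVowels ⊆ (pvLoopA palabra.toList [] 0).1 :=
        fun v h => (hmem v).mpr ⟨h, hv v h⟩
      have hsp : List.Subperm pvVowels (pvLoopA palabra.toList [] 0).1 :=
        (by decide : pvVowels.Nodup).subperm hsub
      simpa [pvVowels] using hsp.length_le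
  have hset : (PySem.Set.ofList ['a', 'e', 'i', 'o', 'u'] : PySem.Set Char) = pvVowels := by decide
  show (if (pvLoopA palabra.toList [] 0).2 < 5 then false else true) =
    PySem.Set.issubset (PySem.Set.ofList ['a', 'e', 'i', 'o', 'u']) (PySem.Set.ofList palabra.toList)
  rw [hset]
  by_cases h5 : 5 ≤ (pvLoopA palabra.toList [] 0).1.length
  · rw [if_neg (by rw [hlen]; omega)]
    symm
    rw [PySem.Set.issubset_iff]
    intro v hv
    rw [PySem.Set.mem_ofList]
    exact hall.mp h5 v hv
  · rw [if_pos (by rw [hlen]; omega)]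
    symm
    rw [Bool.eq_false_iff]
    intro hc
    apply h5
    apply hall.mpr
    intro v hv
    rw [PySem.Set.issubset_iff] at hc
    have := hc v hv
    rwa [PySem.Set.mem_ofList] at this
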